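-- pv_equiv track=rewrite | github.com/sanyukta-D/Optimal_Strategies_in_RCV | rcv_strategies/core/strategy.py | str_for_given_winners_with_position_constraints
-- ===== SOURCE A (Python) =====
-- from itertools import combinations, permutations
--
-- def str_for_given_winners_with_position_constraints(winners, candidates, top_k, bottom_m):
--     """
--     Return a list of main structures for given winners with position constraints.
--
--     Args:
--         winners: List of winning candidates
--         candidates: List of all candidates
--         top_k: List of candidates that cannot appear in the bottom m positions
--         bottom_m: List of candidates that cannot appear in the top k positions
--     """
--     # Check if winners contain any bottom_m candidates (invalid combination)
--     if any(winner in bottom_m for winner in winners):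
--         return []
--
--     losers = [item for item in candidates if item not in winners]
--     potential_sets = []
--
--     k = len(top_k)  # Number of top positions to constrain
--     m = len(bottom_m)  # Number of bottom positions to constrain
--
--     for perm_w in permutations(winners, len(winners)):
--         # Check if any bottom_m candidates appear in the top k positions
--         # (assuming len(perm_w) >= k, otherwise we just check what we have)
--         top_positions = perm_w[:min(k, len(perm_w))]
--         if any(candidate in bottom_m for candidate in top_positions):
--             continue
--
--         for perm_l in permutations(losers, len(losers)):
--             # Check if any top_k candidates appear in the last m positions
--             # (assuming len(perm_l) >= m, otherwise we just check what we have)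
--             bottom_positions = perm_l[-min(m, len(perm_l)):]
--             if any(candidate in top_k for candidate in bottom_positions):
--                 continue
--
--             potential_sets.append(list(perm_w) + list(perm_l))
--
--     return potential_sets
-- ===== SOURCE B (Python) =====
-- def str_for_given_winners_with_position_constraints(winners, candidates, top_k, bottom_m):
--     # Winners containing a bottom_m candidate is an invalid combination.
--     if any(w in bottom_m for w in winners):
--         return []
--
--     losers = [c for c in candidates if c not in winners]
--     k = len(top_k)
--     m = len(bottom_m)
--     lo = max(len(losers) - m, 0)  # first bottom position among the losers
--
--     # Constraint-aware backtracking: build each permutation position by position,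
--     # pruning a placement as soon as it violates a position constraint, so no
--     # invalid permutation is ever generated (A generates all and filters).
--     def gen(remaining, pos, forbidden):
--         if not remaining:
--             return [[]]
--         out = []
--         for i, x in enumerate(remaining):
--             if forbidden(pos, x):
--                 continue
--             rest = remaining[:i] + remaining[i + 1:]
--             for tail in gen(rest, pos + 1, forbidden):
--                 out.append([x] + tail)
--         return out
--
--     wperms = gen(list(winners), 0, lambda p, x: p < k and x in bottom_m)
--     lperms = gen(losers, 0, lambda p, x: p >= lo and x in top_k)
--     return [w + l for w in wperms for l in lperms]
-- ===== Notes on version B (the rewrite author's own statement) =====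
-- stated objective: alternative
-- what changed: B replaces A's enumerate-all-then-filter nested permutation loops with recursive constraint-aware backtracking that builds each winner/loser permutation position by position and prunes forbidden placements immediately, then takes the product of the two valid lists.
-- intended difference: When bottom_m is empty and some loser is in top_k, A's perm_l[-min(0,len):] slice is the whole list (the -0 slicing bug), so A filters every loser permutation against top_k and returns [], while B applies no bottom constraint (m=0 means none) and returns all valid orderings, which is the intended meaning. — e.g. on str_for_given_winners_with_position_constraints(["w"], ["w", "x"], ["x"], []): A returns [], B returns [["w", "x"]]
import Mathlib
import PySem

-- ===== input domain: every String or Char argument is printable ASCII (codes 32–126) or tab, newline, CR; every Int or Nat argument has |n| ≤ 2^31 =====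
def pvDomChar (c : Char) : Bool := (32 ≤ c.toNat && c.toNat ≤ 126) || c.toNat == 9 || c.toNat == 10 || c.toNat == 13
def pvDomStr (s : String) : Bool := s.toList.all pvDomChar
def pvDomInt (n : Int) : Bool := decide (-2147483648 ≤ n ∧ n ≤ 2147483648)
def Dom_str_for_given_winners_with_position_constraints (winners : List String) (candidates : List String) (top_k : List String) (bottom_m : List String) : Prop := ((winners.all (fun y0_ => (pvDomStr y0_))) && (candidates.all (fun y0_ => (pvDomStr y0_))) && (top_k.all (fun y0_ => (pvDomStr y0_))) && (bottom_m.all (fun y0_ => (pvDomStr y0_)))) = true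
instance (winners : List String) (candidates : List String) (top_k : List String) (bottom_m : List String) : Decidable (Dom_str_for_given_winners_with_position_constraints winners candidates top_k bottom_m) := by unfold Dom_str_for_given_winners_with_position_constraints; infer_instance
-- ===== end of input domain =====

-- B builds each permutation by constraint-aware backtracking (pruning forbidden placements
-- immediately) instead of A's enumerate-all-then-filter nested loops (objective: alternative);
-- on the bottom_m = [] corner B is intentionally different (A's -0 slicing bug), see D_ below.

-- ===== PORT A =====
def str_for_given_winners_with_position_constraints (winners : List String) (candidates : List String) (top_k : List String) (bottom_m : List String) : List (List String) :=
  if winners.any (fun winner => bottom_m.contains winner) then []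
  else
    let losers := candidates.filter (fun item => !(winners.contains item))
    let k := top_k.length
    let m := bottom_m.length
    (PySem.List.permutations winners winners.length).foldl (fun potential_sets perm_w =>
      -- top_positions = perm_w[:min(k, len(perm_w))]
      let top_positions := PySem.List.slice perm_w none (some ((min k perm_w.length : Nat) : Int))
      if top_positions.any (fun candidate => bottom_m.contains candidate) then potential_sets
      else
        (PySem.List.permutations losers losers.length).foldl (fun acc perm_l =>
          -- bottom_positions = perm_l[-min(m, len(perm_l)):]
          let bottom_positions := PySem.List.slice perm_l (some (-((min m perm_l.length : Nat) : Int))) none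
          if bottom_positions.any (fun candidate => top_k.contains candidate) then acc
          else acc ++ [perm_w ++ perm_l]) potential_sets) []

-- ===== PORT B =====
-- gen(remaining, pos, forbidden) from Source B: backtracking over the remaining elements in order,
-- skipping a placement as soon as 'forbidden(pos, x)' holds; the Nat fuel mirrors the
-- 'if not remaining' base case (it is always called with fuel = remaining.length).
def pvGen (forb : Nat → String → Bool) : Nat → Nat → List String → List (List String)
  | _, 0, _ => [[]]
  | pos, r + 1, rem =>
      (List.range rem.length).flatMap (fun i =>
        match rem[i]? with
        | none => []
        | some x =>
            if forb pos x then []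
            else (pvGen forb (pos + 1) r (rem.eraseIdx i)).map (fun tail => x :: tail))

def str_for_given_winners_with_position_constraints_alt (winners : List String) (candidates : List String) (top_k : List String) (bottom_m : List String) : List (List String) :=
  if winners.any (fun w => bottom_m.contains w) then []
  else
    let losers := candidates.filter (fun c => !(winners.contains c))
    let k := top_k.length
    let m := bottom_m.length
    let lo := losers.length - m   -- max(len(losers) - m, 0): first bottom position
    let wperms := pvGen (fun p x => decide (p < k) && bottom_m.contains x) 0 winners.length winners
    let lperms := pvGen (fun p x => decide (lo ≤ p) && top_k.contains x) 0 losers.length losers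
    wperms.flatMap (fun w => lperms.map (fun l => w ++ l))

-- ===== PRECONDITION & SPEC =====
-- When bottom_m is empty and some loser is in top_k, A's perm_l[-min(0,len):] slice is the whole
-- list (-0 slicing bug), so A filters every loser permutation against top_k and returns [];
-- B applies no bottom constraint (m = 0 means none) and returns all valid orderings, as intended.
def D_str_for_given_winners_with_position_constraints (winners : List String) (candidates : List String) (top_k : List String) (bottom_m : List String) : Prop :=
  bottom_m = [] ∧ ∃ c ∈ candidates, winners.contains c = false ∧ top_k.contains c = true
instance (winners : List String) (candidates : List String) (top_k : List String) (bottom_m : List String) : Decidable (D_str_for_given_winners_with_position_constraints winners candidates top_k bottom_m) := by unfold D_str_for_given_winners_with_position_constraints; infer_instance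

def Spec_str_for_given_winners_with_position_constraints (winners : List String) (candidates : List String) (top_k : List String) (bottom_m : List String) (out : List (List String)) : Prop := ¬ D_str_for_given_winners_with_position_constraints winners candidates top_k bottom_m → out = str_for_given_winners_with_position_constraints_alt winners candidates top_k bottom_m
instance (winners : List String) (candidates : List String) (top_k : List String) (bottom_m : List String) (out : List (List String)) : Decidable (Spec_str_for_given_winners_with_position_constraints winners candidates top_k bottom_m out) := by unfold Spec_str_for_given_winners_with_position_constraints; infer_instance

def pvDiffWitness_str_for_given_winners_with_position_constraints : List String × List String × List String × List String :=
  (["w"], ["w", "x"], ["x"], [])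
def pvDiffWitnessOut_str_for_given_winners_with_position_constraints : (List (List String)) × (List (List String)) :=
  ([], [["w", "x"]])

-- ===== CLAIM =====
def Claim_unchanged_str_for_given_winners_with_position_constraints : Prop := ∀ (winners : List String) (candidates : List String) (top_k : List String) (bottom_m : List String), Dom_str_for_given_winners_with_position_constraints winners candidates top_k bottom_m → Spec_str_for_given_winners_with_position_constraints winners candidates top_k bottom_m (str_for_given_winners_with_position_constraints winners candidates top_k bottom_m)
def Claim_changed_str_for_given_winners_with_position_constraints : Prop := Dom_str_for_given_winners_with_position_constraints (pvDiffWitness_str_for_given_winners_with_position_constraints.1) (pvDiffWitness_str_for_given_winners_with_position_constraints.2.1) (pvDiffWitness_str_for_given_winners_with_position_constraints.2.2.1) (pvDiffWitness_str_for_given_winners_with_position_constraints.2.2.2) ∧ D_str_for_given_winners_with_position_constraints (pvDiffWitness_str_for_given_winners_with_position_constraints.1) (pvDiffWitness_str_for_given_winners_with_position_constraints.2.1) (pvDiffWitness_str_for_given_winners_with_position_constraints.2.2.1) (pvDiffWitness_str_for_given_winners_with_position_constraints.2.2.2) ∧ str_for_given_winners_with_position_constraints (pvDiffWitness_str_for_given_winners_with_position_constraints.1)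 (pvDiffWitness_str_for_given_winners_with_position_constraints.2.1) (pvDiffWitness_str_for_given_winners_with_position_constraints.2.2.1) (pvDiffWitness_str_for_given_winners_with_position_constraints.2.2.2) = pvDiffWitnessOut_str_for_given_winners_with_position_constraints.1 ∧ str_for_given_winners_with_position_constraints_alt (pvDiffWitness_str_for_given_winners_with_position_constraints.1) (pvDiffWitness_str_for_given_winners_with_position_constraints.2.1) (pvDiffWitness_str_for_given_winners_with_position_constraints.2.2.1) (pvDiffWitness_str_for_given_winners_with_position_constraints.2.2.2) = pvDiffWitnessOut_str_for_given_winners_with_position_constraints.2 ∧ pvDiffWitnessOut_str_for_given_winners_with_position_constraints.1 ≠ pvDiffWitnessOut_str_for_given_winners_with_position_constraints.2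
def Claim_exact_str_for_given_winners_with_position_constraints : Prop := ∀ (winners : List String) (candidates : List String) (top_k : List String) (bottom_m : List String), Dom_str_for_given_winners_with_position_constraints winners candidates top_k bottom_m → D_str_for_given_winners_with_position_constraints winners candidates top_k bottom_m → str_for_given_winners_with_position_constraints winners candidates top_k bottom_m ≠ str_for_given_winners_with_position_constraints_alt winners candidates top_k bottom_m

-- ===== LEMMAS AND PROOFS =====

-- the validity predicate pvGen's pruning implements, read off a finished permutation
def pvOk (forb : Nat → String → Bool) : Nat → List String → Bool
  | _, [] => true
  | pos, x :: t => !forb pos x && pvOk forb (pos + 1) t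

-- unfolding of PySem.List.permutations at a successor fuel (its own recursion step)
lemma permutations_succ {α : Type} (xs : List α) (r : Nat) :
    PySem.List.permutations xs (r + 1)
      = (List.range xs.length).flatMap (fun i =>
          match xs[i]? with
          | none => []
          | some x => (PySem.List.permutations (xs.eraseIdx i) r).map (fun p => x :: p)) := by
  simp [PySem.List.permutations]; rfl

-- backtracking = enumerate-then-filter
lemma pvGen_eq_filter (forb : Nat → String → Bool) :
    ∀ (r : Nat) (rem : List String) (pos : Nat), rem.length = r →
      pvGen forb pos r rem = (PySem.List.permutations rem r).filter (pvOk forb pos) := by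
  intro r
  induction r with
  | zero => intro rem pos _; simp [pvGen, PySem.List.permutations, pvOk]
  | succ r ih =>
    intro rem pos hlen
    show (List.range rem.length).flatMap _ = _
    rw [permutations_succ, List.filter_flatMap]
    apply List.flatMap_congr
    intro i hi
    rw [List.mem_range] at hi
    rw [List.getElem?_eq_getElem hi]
    simp only
    rw [List.filter_map]
    have herase : (rem.eraseIdx i).length = r := by
      rw [List.length_eraseIdx_of_lt hi]; omega
    by_cases hf : forb pos rem[i] = true
    · rw [if_pos hf]
      have : (pvOk forb pos ∘ fun p => rem[i] :: p) = fun _ => false := by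
        funext p; simp [pvOk, hf]
      rw [this, List.filter_false, List.map_nil]
    · rw [if_neg hf, ih _ (pos + 1) herase]
      congr 1
      apply List.filter_congr
      intro p _
      have hf' : forb pos rem[i] = false := by simpa using hf
      simp [pvOk, hf']

-- pvOk for the winner-side constraint is A's take-k check
lemma pvOk_lt (k : Nat) (c : String → Bool) :
    ∀ (p : List String) (pos : Nat),
      pvOk (fun q x => decide (q < k) && c x) pos p = !((p.take (k - pos)).any c) := by
  intro p
  induction p with
  | nil => intro pos; simp [pvOk]
  | cons x t ih =>
    intro pos
    have hstep : pvOk (fun q x => decide (q < k) && c x) pos (x :: t)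
        = (!(decide (pos < k) && c x) && pvOk (fun q x => decide (q < k) && c x) (pos + 1) t) := rfl
    by_cases h : pos < k
    · have hk : k - pos = (k - (pos + 1)) + 1 := by omega
      rw [hstep, ih (pos + 1), hk]
      simp [h]
    · have hk : k - pos = 0 := by omega
      have hk' : k - (pos + 1) = 0 := by omega
      rw [hstep, ih (pos + 1), hk, hk']
      simp [h]

-- pvOk for the loser-side constraint is A's drop-(n−m) check
lemma pvOk_ge (lo : Nat) (c : String → Bool) :
    ∀ (p : List String) (pos : Nat),
      pvOk (fun q x => decide (lo ≤ q) && c x) pos p = !((p.drop (lo - pos)).any c) := by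
  intro p
  induction p with
  | nil => intro pos; simp [pvOk]
  | cons x t ih =>
    intro pos
    have hstep : pvOk (fun q x => decide (lo ≤ q) && c x) pos (x :: t)
        = (!(decide (lo ≤ pos) && c x) && pvOk (fun q x => decide (lo ≤ q) && c x) (pos + 1) t) := rfl
    by_cases h : lo ≤ pos
    · have hk : lo - pos = 0 := by omega
      have hk' : lo - (pos + 1) = 0 := by omega
      rw [hstep, ih (pos + 1), hk, hk']
      simp [h]
    · have hk : lo - pos = (lo - (pos + 1)) + 1 := by omega
      rw [hstep, ih (pos + 1), hk]
      simp [h]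

-- Python's xs[:min(k, len(xs))] equals xs.take k (take clamps).
lemma slice_to_min {α : Type} (xs : List α) (k : Nat) :
    PySem.List.slice xs none (some ((min k xs.length : Nat) : Int)) = xs.take k := by
  rw [PySem.List.slice_to_natCast]
  rcases Nat.le_total k xs.length with h | h
  · rw [Nat.min_eq_left h]
  · rw [Nat.min_eq_right h, List.take_length, List.take_of_length_le h]

-- Python's xs[-min(m, len(xs)):] equals xs.drop (len − m) — for m > 0 (the -0 bug is m = 0).
lemma slice_from_neg_min {α : Type} (xs : List α) (m : Nat) (hm : 0 < m) :
    PySem.List.slice xs (some (-((min m xs.length : Nat) : Int))) none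
      = xs.drop (xs.length - m) := by
  rw [PySem.List.slice_some_none]
  congr 1
  unfold PySem.List.clampIdx
  split_ifs <;> omega

-- A loop 'if p x then skip else append (f x)' collects map f over the filter of ¬p.
lemma foldl_skip_append {α β : Type} (p : α → Bool) (f : α → β) (l : List α) (acc : List β) :
    l.foldl (fun acc x => if p x then acc else acc ++ [f x]) acc
      = acc ++ (l.filter (fun x => !p x)).map f := by
  have h : (fun (acc : List β) (x : α) => if p x then acc else acc ++ [f x])
      = (fun acc x => if (!p x) then acc ++ [f x] else acc) := by
    funext acc x; cases hp : p x <;> simp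
  rw [h, PySem.List.foldl_append_if]

-- filter-then-flatMap as a flatMap with an if body (the shape A's loops reduce to)
lemma flatMap_filter_eq {α β : Type} (p : α → Bool) (f : α → List β) (l : List α) :
    l.flatMap (fun x => if p x then f x else []) = (l.filter p).flatMap f := by
  induction l with
  | nil => rfl
  | cons x t ih =>
    by_cases h : p x = true <;> simp [h, ih]

-- full permutations are never empty
lemma permutations_ne_nil {α : Type} :
    ∀ (r : Nat) (xs : List α), xs.length = r → PySem.List.permutations xs r ≠ [] := by
  intro r
  induction r with
  | zero => intro xs _; simp [PySem.List.permutations]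
  | succ r ih =>
    intro xs hlen
    have h0 : 0 < xs.length := by omega
    show (List.range xs.length).flatMap _ ≠ []
    simp only [ne_eq, List.flatMap_eq_nil_iff, not_forall]
    refine ⟨0, by simpa using h0, ?_⟩
    rw [List.getElem?_eq_getElem h0]
    simp only [List.map_eq_nil_iff]
    exact ih (xs.eraseIdx 0) (by rw [List.length_eraseIdx_of_lt h0]; omega)


-- foldl with a no-op step is the identity
lemma pv_foldl_id {α β : Type} (l : List α) (init : β) :
    l.foldl (fun acc _ => acc) init = init := by
  induction l generalizing init with
  | nil => rfl
  | cons x t ih => exact ih init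

-- the two programs after the early return, with the no-bottom_m/no-overlap side condition
lemma pv_main_core (winners losers top_k bottom_m : List String)
    (hno : bottom_m = [] → ∀ x ∈ losers, top_k.contains x = false) :
    (PySem.List.permutations winners winners.length).foldl (fun potential_sets perm_w =>
      if (PySem.List.slice perm_w none (some ((min top_k.length perm_w.length : Nat) : Int))).any
          (fun candidate => bottom_m.contains candidate) then potential_sets
      else
        (PySem.List.permutations losers losers.length).foldl (fun acc perm_l =>
          if (PySem.List.slice perm_l (some (-((min bottom_m.length perm_l.length : Nat) : Int))) none).any
              (fun candidate => top_k.contains candidate) then acc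
          else acc ++ [perm_w ++ perm_l]) potential_sets) []
    = (pvGen (fun p x => decide (p < top_k.length) && bottom_m.contains x) 0 winners.length winners).flatMap
        (fun w => (pvGen (fun p x => decide ((losers.length - bottom_m.length) ≤ p) && top_k.contains x) 0 losers.length losers).map
          (fun l => w ++ l)) := by
  -- abbreviations
  have hWpred : ∀ w, pvOk (fun p x => decide (p < top_k.length) && bottom_m.contains x) 0 w
      = !((w.take top_k.length).any (fun x => bottom_m.contains x)) := by
    intro w; simpa using pvOk_lt top_k.length (fun x => bottom_m.contains x) w 0
  have hLpred : ∀ l, pvOk (fun p x => decide ((losers.length - bottom_m.length) ≤ p) && top_k.contains x) 0 l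
      = !((l.drop (losers.length - bottom_m.length)).any (fun x => top_k.contains x)) := by
    intro l; simpa using pvOk_ge (losers.length - bottom_m.length) (fun x => top_k.contains x) l 0
  -- the loser filter, after the slice is resolved (this is where the two sides must agree)
  have hLfilter : (PySem.List.permutations losers losers.length).filter
        (fun l => !((PySem.List.slice l (some (-((min bottom_m.length l.length : Nat) : Int))) none).any
          (fun candidate => top_k.contains candidate)))
      = (PySem.List.permutations losers losers.length).filter
        (fun l => !((l.drop (losers.length - bottom_m.length)).any (fun x => top_k.contains x))) := by
    apply List.filter_congr
    intro l hl
    have hperm := PySem.List.perm_of_mem_permutations hl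
    have hlen : l.length = losers.length := hperm.length_eq
    rcases Nat.eq_zero_or_pos bottom_m.length with hm | hm
    · -- bottom_m = []: both anys are false (no loser is in top_k)
      have hb : bottom_m = [] := List.length_eq_zero_iff.mp hm
      have hall : ∀ x ∈ l, top_k.contains x = false := fun x hx =>
        hno hb x (hperm.mem_iff.mp hx)
      have h1 : ∀ (s : List String), (∀ x ∈ s, x ∈ l) →
          s.any (fun x => top_k.contains x) = false := by
        intro s hs
        rw [List.any_eq_false]
        intro x hx
        simpa using hall x (hs x hx)
      rw [h1 _ (fun x hx => by
            rw [PySem.List.slice_some_none] at hx; exact List.mem_of_mem_drop hx),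
          h1 _ (fun x hx => List.mem_of_mem_drop hx)]
    · rw [slice_from_neg_min l bottom_m.length hm, hlen]
  -- A's nested loops become a flatMap over an if-body
  rw [PySem.List.foldl_congr_mem _ _
      (fun potential_sets perm_w => potential_sets ++
        (if (perm_w.take top_k.length).any (fun x => bottom_m.contains x) then []
         else ((PySem.List.permutations losers losers.length).filter
            (fun l => !((l.drop (losers.length - bottom_m.length)).any (fun x => top_k.contains x)))).map
            (fun l => perm_w ++ l))) []
      (by
        intro acc w _
        simp only []
        rw [slice_to_min, foldl_skip_append
          (fun l => (PySem.List.slice l (some (-((min bottom_m.length l.length : Nat) : Int))) none).any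
            (fun candidate => top_k.contains candidate)) (fun l => w ++ l), hLfilter]
        by_cases hb : (w.take top_k.length).any (fun x => bottom_m.contains x) = true
        · rw [if_pos hb, if_pos hb, List.append_nil]
        · rw [if_neg hb, if_neg hb])]
  rw [PySem.List.foldl_append_eq_flatMap, List.nil_append]
  -- B's backtracking becomes filter-then-flatMap of the same data
  rw [pvGen_eq_filter _ winners.length winners 0 rfl,
      pvGen_eq_filter _ losers.length losers 0 rfl,
      funext hWpred, funext hLpred, ← flatMap_filter_eq]
  apply List.flatMap_congr
  intro w _
  by_cases hb : (w.take top_k.length).any (fun x => bottom_m.contains x) = true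
  · rw [if_pos hb, if_neg (by simp only [hb]; decide)]
  · have hb' : ((w.take top_k.length).any (fun x => bottom_m.contains x)) = false := by
      simpa using hb
    rw [if_neg hb, if_pos (by simp only [hb']; decide)]

-- ===== VERDICT =====
theorem str_for_given_winners_with_position_constraints_spec : Claim_unchanged_str_for_given_winners_with_position_constraints := by
  intro winners candidates top_k bottom_m _ hnd
  show _ = str_for_given_winners_with_position_constraints_alt winners candidates top_k bottom_m
  unfold str_for_given_winners_with_position_constraints
    str_for_given_winners_with_position_constraints_alt
  by_cases hw : (winners.any fun w => bottom_m.contains w) = true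
  · rw [if_pos hw, if_pos hw]
  · rw [if_neg hw, if_neg hw]
    refine pv_main_core winners (candidates.filter (fun c => !(winners.contains c))) top_k bottom_m ?_
    intro hb x hx
    rw [List.mem_filter] at hx
    by_contra hcon
    exact hnd ⟨hb, x, hx.1, by simpa using hx.2, by simpa using hcon⟩

theorem str_for_given_winners_with_position_constraints_changed : Claim_changed_str_for_given_winners_with_position_constraints := by
  unfold Claim_changed_str_for_given_winners_with_position_constraints; decide

theorem str_for_given_winners_with_position_constraints_tight : Claim_exact_str_for_given_winners_with_position_constraints := by
  intro winners candidates top_k bottom_m _ hd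
  obtain ⟨hb, x, hxc, hxw, hxt⟩ := hd
  subst hb
  set losers := candidates.filter (fun c => !(winners.contains c)) with hlosers
  have hxl : x ∈ losers := by rw [hlosers, List.mem_filter]; exact ⟨hxc, by simpa using hxw⟩
  have hwfalse : (winners.any fun w => ([] : List String).contains w) = false := by simp
  -- A returns []: with m = 0 the -0 slice is the whole permutation, which contains x ∈ top_k
  have hA : str_for_given_winners_with_position_constraints winners candidates top_k [] = [] := by
    unfold str_for_given_winners_with_position_constraints
    rw [if_neg (by simp)]
    rw [PySem.List.foldl_congr_mem _ _ (fun acc _ => acc) []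
      (by
        intro acc w _
        simp only []
        have hinner : (PySem.List.permutations losers losers.length).foldl (fun acc perm_l =>
            if (PySem.List.slice perm_l (some (-((min (List.length ([] : List String)) perm_l.length : Nat) : Int))) none).any
                (fun candidate => top_k.contains candidate) then acc
            else acc ++ [w ++ perm_l]) acc = acc := by
          rw [PySem.List.foldl_congr_mem _ _ (fun acc _ => acc) acc
            (by
              intro acc2 l hl
              simp only []
              have hperm := PySem.List.perm_of_mem_permutations hl
              have hany : (PySem.List.slice l (some (-((min (List.length ([] : List String)) l.length : Nat) : Int))) none).any
                  (fun candidate => top_k.contains candidate) = true := by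
                have : ((min (List.length ([] : List String)) l.length : Nat) : Int) = 0 := by simp
                rw [this, neg_zero, PySem.List.slice_some_none]
                have h0 : PySem.List.clampIdx l.length 0 = 0 := by
                  unfold PySem.List.clampIdx; split_ifs <;> omega
                rw [h0, List.drop_zero, List.any_eq_true]
                exact ⟨x, hperm.mem_iff.mpr hxl, hxt⟩
              rw [if_pos hany])]
          exact pv_foldl_id _ acc
        split_ifs <;> [rfl; exact hinner])]
    exact pv_foldl_id _ []
  -- B returns a nonempty list
  have hB : str_for_given_winners_with_position_constraints_alt winners candidates top_k [] ≠ [] := by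
    unfold str_for_given_winners_with_position_constraints_alt
    rw [if_neg (by simp)]
    simp only []
    rw [pvGen_eq_filter _ winners.length winners 0 rfl,
        pvGen_eq_filter _ losers.length losers 0 rfl]
    have hWall : (PySem.List.permutations winners winners.length).filter
        (pvOk (fun p x => decide (p < top_k.length) && ([] : List String).contains x) 0)
        = PySem.List.permutations winners winners.length := by
      apply List.filter_eq_self.mpr
      intro w _
      have := pvOk_lt top_k.length (fun x => ([] : List String).contains x) w 0
      simp only [Nat.sub_zero] at this
      rw [this]
      simp
    have hLall : (PySem.List.permutations losers losers.length).filter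
        (pvOk (fun p x => decide ((losers.length - List.length ([] : List String)) ≤ p) && top_k.contains x) 0)
        = PySem.List.permutations losers losers.length := by
      apply List.filter_eq_self.mpr
      intro l hl
      have hlen : l.length = losers.length := (PySem.List.perm_of_mem_permutations hl).length_eq
      have := pvOk_ge (losers.length - List.length ([] : List String)) (fun x => top_k.contains x) l 0
      simp only [Nat.sub_zero] at this
      rw [this]
      simp [← hlen]
    rw [hWall, hLall]
    intro hnil
    rw [List.flatMap_eq_nil_iff] at hnil
    obtain ⟨w, hwmem⟩ := List.exists_mem_of_ne_nil _ (permutations_ne_nil winners.length winners rfl)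
    have := hnil w hwmem
    rw [List.map_eq_nil_iff] at this
    exact permutations_ne_nil losers.length losers rfl this
  rw [hA]
  exact fun h => hB h.symm
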